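-- pv_equiv track=rewrite | github.com/GHLisz/algorithm-exercises | lintcode/932-friends-within-three-jumps.py | withinThreeJumps
-- ===== SOURCE A (Python) =====
-- def withinThreeJumps(a, b, c, d):
--     # Write your code here
--     def dfs(x, y, g, step):
--         if step > 3: return
--         if x == y: return 1
--         for i in g[x]:
--             if dfs(i, y, g, step + 1) == 1:
--                 return 1
--         return 0
--
--     g, res = [[] for _ in range(1001)], []
--     for i in range(len(a)):
--         g[a[i]].append(b[i])
--         g[b[i]].append(a[i])
--     for i in range(len(c)):
--         res.append(dfs(c[i], d[i], g, 0))
--     return res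
-- ===== SOURCE B (Python) =====
-- def withinThreeJumps(a, b, c, d):
--     g = [set() for _ in range(1001)]
--     for x, y in zip(a, b):
--         g[x].add(y)
--         g[y].add(x)
--     res = []
--     for s, t in zip(c, d):
--         reach = {s}
--         for _ in range(3):
--             nxt = set(reach)
--             for v in reach:
--                 nxt |= g[v]
--             reach = nxt
--         res.append(1 if t in reach else 0)
--     return res
-- ===== Notes on version B (the rewrite author's own statement) =====
-- stated objective: alternative
-- what changed: replaces A's per-query depth-3 recursive DFS, which explores every walk of length <= 3 from the source, by a deduplicating set adjacency built once and three rounds of reachable-set expansion per query, then a membership test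
-- outside the precondition, e.g. on withinThreeJumps([], [], [2000], [2000]): A returns [1], B raises IndexError
import Mathlib
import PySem

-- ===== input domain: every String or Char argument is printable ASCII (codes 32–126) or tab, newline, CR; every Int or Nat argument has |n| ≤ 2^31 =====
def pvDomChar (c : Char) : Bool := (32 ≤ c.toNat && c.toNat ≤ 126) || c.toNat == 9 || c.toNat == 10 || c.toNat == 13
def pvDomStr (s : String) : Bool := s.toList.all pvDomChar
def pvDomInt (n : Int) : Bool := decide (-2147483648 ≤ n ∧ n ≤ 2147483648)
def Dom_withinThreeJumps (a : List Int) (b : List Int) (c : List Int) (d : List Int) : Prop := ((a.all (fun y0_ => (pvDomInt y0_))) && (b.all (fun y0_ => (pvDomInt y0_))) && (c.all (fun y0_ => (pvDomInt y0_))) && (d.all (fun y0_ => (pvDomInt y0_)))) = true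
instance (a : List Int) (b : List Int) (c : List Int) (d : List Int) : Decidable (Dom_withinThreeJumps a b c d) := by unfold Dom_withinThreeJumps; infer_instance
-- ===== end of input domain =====

-- B replaces A's per-query depth-3 recursive DFS (which explores every walk of length ≤ 3) by a
-- deduplicating set adjacency built once and three rounds of reachable-set expansion per query.

-- ===== PORT A =====
-- Python dfs: the bare `return` (step > 3) is `none`; `return 1` / `return 0` are `some 1` / `some 0`;
-- the early-return for-loop over g[x] is the short-circuiting `List.any`.
def dfsA (g : List (List Int)) (y : Int) (x : Int) (step : Nat) : Option Int :=
  if _h : step > 3 then none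
  else if x = y then some 1
  else if (PySem.List.pyGetD g x []).any (fun i => dfsA g y i (step + 1) == some 1) then some 1
  else some 0
termination_by 4 - step
decreasing_by omega

def withinThreeJumps (a : List Int) (b : List Int) (c : List Int) (d : List Int) : List Int :=
  let g := (List.range a.length).foldl (fun g (i : Nat) =>
      let g1 := PySem.List.pySetD g (PySem.List.pyGetD a (i : Int) 0)
          (PySem.List.pyGetD g (PySem.List.pyGetD a (i : Int) 0) [] ++ [PySem.List.pyGetD b (i : Int) 0])
      PySem.List.pySetD g1 (PySem.List.pyGetD b (i : Int) 0)
          (PySem.List.pyGetD g1 (PySem.List.pyGetD b (i : Int) 0) [] ++ [PySem.List.pyGetD a (i : Int) 0]))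
    (List.replicate 1001 ([] : List Int))
  (List.range c.length).foldl (fun res (i : Nat) =>
      -- dfs is called with step = 0, where the `none` branch is unreachable; `.getD 0` is never used
      res ++ [(dfsA g (PySem.List.pyGetD d (i : Int) 0) (PySem.List.pyGetD c (i : Int) 0) 0).getD 0]) []

-- ===== PORT B =====
-- one expansion round: nxt = set(reach); for v in reach: nxt |= g[v]
def expandB (g : List (PySem.Set Int)) (reach : PySem.Set Int) : PySem.Set Int :=
  reach.foldl (fun nxt v => PySem.Set.union nxt (PySem.List.pyGetD g v []))
    (PySem.Set.ofList reach)

def withinThreeJumps_alt (a : List Int) (b : List Int) (c : List Int) (d : List Int) : List Int :=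
  let g := (a.zip b).foldl (fun g p =>
      let g1 := PySem.List.pySetD g p.1 (PySem.Set.add (PySem.List.pyGetD g p.1 []) p.2)
      PySem.List.pySetD g1 p.2 (PySem.Set.add (PySem.List.pyGetD g1 p.2 []) p.1))
    (List.replicate 1001 (PySem.Set.empty : PySem.Set Int))
  (c.zip d).foldl (fun res p =>
      let reach := (List.range 3).foldl (fun r _ => expandB g r) (PySem.Set.ofList [p.1])
      res ++ [if PySem.Set.contains reach p.2 then (1 : Int) else 0]) []

-- ===== PRECONDITION & SPEC =====
-- Pre_ admits exactly where the Python A returns normally: b (resp. d) at least as long as a (resp. c),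
-- every edge endpoint and every query source a valid index of the 1001-slot list, i.e. in [-1001, 1000]
-- (negative ids wrap, identically in both programs); outside these, A raises IndexError — except the one
-- corner also excluded here: a query with c[i] = d[i] but c[i] out of range, where A returns 1 via the
-- x == y short-circuit before ever indexing, while B's own algorithm indexes g[c[i]] and raises IndexError.
def Pre_withinThreeJumps (a : List Int) (b : List Int) (c : List Int) (d : List Int) : Prop :=
  a.length ≤ b.length ∧ c.length ≤ d.length ∧
  (∀ x ∈ a, -1001 ≤ x ∧ x ≤ 1000) ∧ (∀ x ∈ b.take a.length, -1001 ≤ x ∧ x ≤ 1000) ∧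
  (∀ x ∈ c, -1001 ≤ x ∧ x ≤ 1000)
instance (a : List Int) (b : List Int) (c : List Int) (d : List Int) : Decidable (Pre_withinThreeJumps a b c d) := by unfold Pre_withinThreeJumps; infer_instance

def pvWitness_withinThreeJumps : List Int × List Int × List Int × List Int := ([0], [1], [0], [2])

def Spec_withinThreeJumps (a : List Int) (b : List Int) (c : List Int) (d : List Int) (out : List Int) : Prop := out = withinThreeJumps_alt a b c d
instance (a : List Int) (b : List Int) (c : List Int) (d : List Int) (out : List Int) : Decidable (Spec_withinThreeJumps a b c d out) := by unfold Spec_withinThreeJumps; infer_instance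

-- ===== CLAIM (what is proved, stated in full; the proofs are below) =====
def Claim_equal_withinThreeJumps : Prop := ∀ (a : List Int) (b : List Int) (c : List Int) (d : List Int), Dom_withinThreeJumps a b c d → Pre_withinThreeJumps a b c d → Spec_withinThreeJumps a b c d (withinThreeJumps a b c d)

-- ===== LEMMAS AND PROOFS =====

-- the two builds index the same slots; only the per-slot container differs (append-list vs set):
-- SameAdj says both graphs answer every neighbour-membership question identically
def SameAdj (gA gB : List (List Int)) : Prop :=
  ∀ v w, w ∈ PySem.List.pyGetD gA v [] ↔ w ∈ PySem.List.pyGetD gB v []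

-- y is reachable from x in at most n steps in the graph read through g (Python indexing)
def ReachLe (g : List (List Int)) : Nat → Int → Int → Prop
  | 0, x, y => x = y
  | n + 1, x, y => x = y ∨ ∃ w ∈ PySem.List.pyGetD g x [], ReachLe g n w y

lemma dfsA_four (g : List (List Int)) (y x : Int) : dfsA g y x 4 = none := by
  rw [dfsA]; simp

lemma dfsA_zero_or_one (g : List (List Int)) (y x : Int) (step : Nat) (h : step ≤ 3) :
    dfsA g y x step = some 1 ∨ dfsA g y x step = some 0 := by
  rw [dfsA]; split_ifs <;> first | omega | simp

lemma dfsA_eq_one_iff (g : List (List Int)) (y : Int) :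
    ∀ (n : Nat) (x : Int), n ≤ 3 → (dfsA g y x (3 - n) = some 1 ↔ ReachLe g n x y) := by
  intro n
  induction n with
  | zero =>
    intro x _
    by_cases hxy : x = y
    · rw [dfsA]; simp [hxy, ReachLe]
    · rw [dfsA]; simp [hxy, ReachLe, dfsA_four]
  | succ n ih =>
    intro x h
    have h3 : 3 - (n + 1) + 1 = 3 - n := by omega
    have hiff : ∀ (cond : Prop) (_ : Decidable cond),
        ((if cond then (some 1 : Option Int) else some 0) = some 1 ↔ cond) := by
      intro cond _; split_ifs with hc <;> simp [hc]
    rw [dfsA, dif_neg (by omega : ¬ 3 - (n + 1) > 3)]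
    by_cases hxy : x = y
    · simp [hxy, ReachLe]
    · rw [if_neg hxy]
      simp only [h3]
      rw [hiff _ _]
      rw [List.any_eq_true]
      constructor
      · rintro ⟨w, hw, hw1⟩
        exact Or.inr ⟨w, hw, (ih w (by omega)).mp (by simpa using hw1)⟩
      · rintro (rfl | ⟨w, hw, hr⟩)
        · exact absurd rfl hxy
        · exact ⟨w, hw, by simpa using (ih w (by omega)).mpr hr⟩

lemma ReachLe_refl (g : List (List Int)) : ∀ n x, ReachLe g n x x := by
  intro n x; cases n <;> simp [ReachLe]

lemma ReachLe_congr {gA gB : List (List Int)} (h : SameAdj gA gB) :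
    ∀ (n : Nat) (x y : Int), ReachLe gA n x y ↔ ReachLe gB n x y := by
  intro n
  induction n with
  | zero => intro x y; simp [ReachLe]
  | succ n ih =>
    intro x y
    simp only [ReachLe]
    constructor
    · rintro (rfl | ⟨w, hw, hr⟩)
      · exact Or.inl rfl
      · exact Or.inr ⟨w, (h x w).mp hw, (ih w y).mp hr⟩
    · rintro (rfl | ⟨w, hw, hr⟩)
      · exact Or.inl rfl
      · exact Or.inr ⟨w, (h x w).mpr hw, (ih w y).mpr hr⟩

lemma ReachLe_snoc (g : List (List Int)) :
    ∀ (n : Nat) (x y : Int), ReachLe g (n + 1) x y ↔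
      ReachLe g n x y ∨ ∃ w, ReachLe g n x w ∧ y ∈ PySem.List.pyGetD g w [] := by
  intro n
  induction n with
  | zero =>
    intro x y
    constructor
    · rintro (rfl | ⟨w, hw, rfl⟩)
      · exact Or.inl rfl
      · exact Or.inr ⟨x, rfl, hw⟩
    · rintro (rfl | ⟨w, rfl, hy⟩)
      · exact Or.inl rfl
      · exact Or.inr ⟨y, hy, rfl⟩
  | succ n ih =>
    intro x y
    constructor
    · rintro (rfl | ⟨u, hu, hr⟩)
      · exact Or.inl (ReachLe_refl g _ _)
      · rcases (ih u y).mp hr with h | ⟨w, hw, hy⟩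
        · exact Or.inl (Or.inr ⟨u, hu, h⟩)
        · exact Or.inr ⟨w, Or.inr ⟨u, hu, hw⟩, hy⟩
    · rintro ((rfl | ⟨u, hu, hr⟩) | ⟨w, (rfl | ⟨u, hu, hw⟩), hy⟩)
      · exact Or.inl rfl
      · exact Or.inr ⟨u, hu, (ih u y).mpr (Or.inl hr)⟩
      · exact Or.inr ⟨y, hy, ReachLe_refl g _ _⟩
      · exact Or.inr ⟨u, hu, (ih u y).mpr (Or.inr ⟨w, hw, hy⟩)⟩

lemma mem_expand_aux (g : List (PySem.Set Int)) (y : Int) :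
    ∀ (l : List Int) (acc : PySem.Set Int),
      y ∈ l.foldl (fun nxt v => PySem.Set.union nxt (PySem.List.pyGetD g v [])) acc ↔
        y ∈ acc ∨ ∃ v ∈ l, y ∈ PySem.List.pyGetD g v [] := by
  intro l
  induction l with
  | nil => simp
  | cons v l ih =>
    intro acc
    rw [List.foldl_cons, ih, PySem.Set.mem_union]
    simp [or_assoc]

lemma mem_expandB (g : List (PySem.Set Int)) (r : PySem.Set Int) (y : Int) :
    y ∈ expandB g r ↔ y ∈ r ∨ ∃ v ∈ r, y ∈ PySem.List.pyGetD g v [] := by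
  unfold expandB
  rw [mem_expand_aux, PySem.Set.mem_ofList]

lemma mem_iter_expand (g : List (PySem.Set Int)) (s : Int) :
    ∀ (n : Nat) (y : Int),
      y ∈ (List.range n).foldl (fun r _ => expandB g r) (PySem.Set.ofList [s]) ↔ ReachLe g n s y := by
  intro n
  induction n with
  | zero => intro y; simp [ReachLe, PySem.Set.mem_ofList, eq_comm]
  | succ n ih =>
    intro y
    rw [List.range_succ, List.foldl_append, List.foldl_cons, List.foldl_nil, mem_expandB,
      ReachLe_snoc]
    simp only [ih]

lemma query_eq {gA : List (List Int)} {gB : List (PySem.Set Int)} (hS : SameAdj gA gB)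
    (s t : Int) :
    (dfsA gA t s 0).getD 0 =
      if PySem.Set.contains ((List.range 3).foldl (fun r _ => expandB gB r) (PySem.Set.ofList [s])) t
      then (1 : Int) else 0 := by
  have h1 : dfsA gA t s 0 = some 1 ↔ ReachLe gA 3 s t := dfsA_eq_one_iff gA t 3 s (by omega)
  by_cases hc : ReachLe gA 3 s t
  · rw [h1.mpr hc]
    simp [(mem_iter_expand gB s 3 t).mpr ((ReachLe_congr hS 3 s t).mp hc)]
  · have h0 : dfsA gA t s 0 = some 0 := by
      rcases dfsA_zero_or_one gA t s 0 (by omega) with h | h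
      · exact absurd (h1.mp h) hc
      · exact h
    rw [h0]
    have hnb : ¬ ReachLe gB 3 s t := fun h => hc ((ReachLe_congr hS 3 s t).mpr h)
    simp [mem_iter_expand gB s, hnb]

-- one slot update on each side keeps the graphs length-equal and membership-equal
lemma pySetD_step {gA gB : List (List Int)} (hlen : gA.length = gB.length)
    (hS : SameAdj gA gB) (i : Int) {L L' : List Int} (hL : ∀ w, w ∈ L ↔ w ∈ L') :
    (PySem.List.pySetD gA i L).length = (PySem.List.pySetD gB i L').length ∧
      SameAdj (PySem.List.pySetD gA i L) (PySem.List.pySetD gB i L') := by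
  simp only [PySem.List.pySetD, PySem.List.pySet?, hlen]
  cases hk : PySem.List.pyIdx? gB.length i with
  | none =>
    simp only [Option.map_none, Option.getD_none]
    exact ⟨hlen, hS⟩
  | some k =>
    simp only [Option.map_some, Option.getD_some]
    refine ⟨by simp [hlen], ?_⟩
    intro v w
    simp only [PySem.List.pyGetD, PySem.List.pyGet?, List.length_set, hlen]
    cases hm : PySem.List.pyIdx? gB.length v with
    | none => simp
    | some m =>
      simp only [Option.bind_some]
      have hSvw := hS v w
      simp only [PySem.List.pyGetD, PySem.List.pyGet?, hlen, hm, Option.bind_some] at hSvw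
      rw [List.getElem?_set, List.getElem?_set]
      by_cases hkm : k = m
      · by_cases hklen : k < gB.length
        · simp only [if_pos hkm, if_pos (show k < gA.length by rw [hlen]; exact hklen),
            if_pos hklen]
          simp [hL w]
        · simp only [if_pos hkm, if_neg (show ¬ k < gA.length by rw [hlen]; exact hklen),
            if_neg hklen]
      · simp only [if_neg hkm]
        exact hSvw

lemma build_inv (ps : List (Int × Int)) :
    ∀ (gA gB : List (List Int)), gA.length = gB.length → SameAdj gA gB →
      (ps.foldl (fun g p =>
          PySem.List.pySetD (PySem.List.pySetD g p.1 (PySem.List.pyGetD g p.1 [] ++ [p.2])) p.2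
            (PySem.List.pyGetD
                (PySem.List.pySetD g p.1 (PySem.List.pyGetD g p.1 [] ++ [p.2])) p.2 [] ++ [p.1])) gA).length
        = (ps.foldl (fun g p =>
          PySem.List.pySetD (PySem.List.pySetD g p.1 (PySem.Set.add (PySem.List.pyGetD g p.1 []) p.2)) p.2
            (PySem.Set.add (PySem.List.pyGetD
                (PySem.List.pySetD g p.1 (PySem.Set.add (PySem.List.pyGetD g p.1 []) p.2)) p.2 []) p.1)) gB).length ∧
      SameAdj
        (ps.foldl (fun g p =>
          PySem.List.pySetD (PySem.List.pySetD g p.1 (PySem.List.pyGetD g p.1 [] ++ [p.2])) p.2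
            (PySem.List.pyGetD
                (PySem.List.pySetD g p.1 (PySem.List.pyGetD g p.1 [] ++ [p.2])) p.2 [] ++ [p.1])) gA)
        (ps.foldl (fun g p =>
          PySem.List.pySetD (PySem.List.pySetD g p.1 (PySem.Set.add (PySem.List.pyGetD g p.1 []) p.2)) p.2
            (PySem.Set.add (PySem.List.pyGetD
                (PySem.List.pySetD g p.1 (PySem.Set.add (PySem.List.pyGetD g p.1 []) p.2)) p.2 []) p.1)) gB) := by
  induction ps with
  | nil => intro gA gB h1 h2; exact ⟨h1, h2⟩
  | cons p ps ih =>
    intro gA gB hlen hS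
    have step1 := pySetD_step hlen hS p.1
      (L := PySem.List.pyGetD gA p.1 [] ++ [p.2])
      (L' := PySem.Set.add (PySem.List.pyGetD gB p.1 []) p.2)
      (by intro w; rw [PySem.Set.mem_add]; simp [hS p.1 w])
    have step2 := pySetD_step step1.1 step1.2 p.2
      (L := PySem.List.pyGetD (PySem.List.pySetD gA p.1 (PySem.List.pyGetD gA p.1 [] ++ [p.2])) p.2 [] ++ [p.1])
      (L' := PySem.Set.add (PySem.List.pyGetD
          (PySem.List.pySetD gB p.1 (PySem.Set.add (PySem.List.pyGetD gB p.1 []) p.2)) p.2 []) p.1)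
      (by intro w; rw [PySem.Set.mem_add]; simp [step1.2 p.2 w])
    exact ih _ _ step2.1 step2.2

lemma foldl_range_zip {γ : Type} (F : γ → Int → Int → γ) :
    ∀ (a b : List Int) (init : γ), a.length ≤ b.length →
      (List.range a.length).foldl (fun g i => F g (a.getD i 0) (b.getD i 0)) init
        = (a.zip b).foldl (fun g p => F g p.1 p.2) init := by
  intro a
  induction a with
  | nil => simp
  | cons x a ih =>
    intro b init h
    cases b with
    | nil => simp at h
    | cons z b =>
      rw [List.length_cons, List.range_succ_eq_map, List.foldl_cons, List.foldl_map,
        List.zip_cons_cons, List.foldl_cons]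
      simp only [List.getD_cons_succ, List.getD_cons_zero]
      exact ih b (F init x z) (by simpa using h)

-- ===== VERDICT (by name: the statement is the Claim_ definition above) =====
theorem withinThreeJumps_spec : Claim_equal_withinThreeJumps := by
  intro a b c d _ hpre
  obtain ⟨hab, hcd, -, -, -⟩ := hpre
  show withinThreeJumps a b c d = withinThreeJumps_alt a b c d
  unfold withinThreeJumps withinThreeJumps_alt
  simp only [PySem.List.pyGetD_natCast]
  rw [foldl_range_zip
      (fun g x y =>
        PySem.List.pySetD (PySem.List.pySetD g x (PySem.List.pyGetD g x [] ++ [y])) y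
          (PySem.List.pyGetD (PySem.List.pySetD g x (PySem.List.pyGetD g x [] ++ [y])) y [] ++ [x]))
      a b _ hab]
  set GA := (a.zip b).foldl
      (fun g p =>
        PySem.List.pySetD (PySem.List.pySetD g p.1 (PySem.List.pyGetD g p.1 [] ++ [p.2])) p.2
          (PySem.List.pyGetD (PySem.List.pySetD g p.1 (PySem.List.pyGetD g p.1 [] ++ [p.2])) p.2 [] ++ [p.1]))
      (List.replicate 1001 ([] : List Int)) with hGA
  set GB := (a.zip b).foldl
      (fun g p =>
        PySem.List.pySetD (PySem.List.pySetD g p.1 (PySem.Set.add (PySem.List.pyGetD g p.1 []) p.2)) p.2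
          (PySem.Set.add (PySem.List.pyGetD
              (PySem.List.pySetD g p.1 (PySem.Set.add (PySem.List.pyGetD g p.1 []) p.2)) p.2 []) p.1))
      (List.replicate 1001 (PySem.Set.empty : PySem.Set Int)) with hGB
  have hS : SameAdj GA GB := by
    rw [hGA, hGB]
    exact (build_inv (a.zip b) (List.replicate 1001 []) (List.replicate 1001 PySem.Set.empty)
      (by rw [List.length_replicate, List.length_replicate]) (fun v w => Iff.rfl)).2
  rw [foldl_range_zip (fun res x y => res ++ [(dfsA GA y x 0).getD 0]) c d _ hcd]
  simp only [query_eq hS]
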